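-- pv_equiv track=rewrite | github.com/zeppeki/project-euler-first100 | problems/problem_011.py | solve_naive
-- ===== SOURCE A (Python) =====
-- DIRECTIONS = [
--     (0, 1),  # 右
--     (1, 0),  # 下
--     (1, 1),  # 右下
--     (1, -1),  # 左下
-- ]
--
-- def is_valid_position(row: int, col: int, grid: list[list[int]]) -> bool:
--     """位置がグリッド内かどうかをチェック"""
--     return 0 <= row < len(grid) and 0 <= col < len(grid[0])
--
-- def get_product_in_direction(
--     grid: list[list[int]],
--     start_row: int,
--     start_col: int,
--     direction: tuple[int, int],
--     length: int,
-- ) -> int: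
--     """指定された方向の積を計算"""
--     dr, dc = direction
--     product = 1
--
--     for i in range(length):
--         row = start_row + i * dr
--         col = start_col + i * dc
--
--         if not is_valid_position(row, col, grid):
--             return 0
--
--         product *= grid[row][col]
--
--     return product
--
-- def solve_naive(grid: list[list[int]], length: int = 4) -> int:
--     """
--     素直な解法: 全方向の全位置から隣接する数の積をチェック
--     時間計算量: O(rows × cols × directions × length)
--     空間計算量: O(1)
--     """
--     if not grid or not grid[0]:
--         return 0
--
--     rows, cols = len(grid), len(grid[0])
--     max_product = 0
--
--     # 各位置から各方向の積を計算
--     for row in range(rows):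
--         for col in range(cols):
--             for direction in DIRECTIONS:
--                 product = get_product_in_direction(grid, row, col, direction, length)
--                 max_product = max(max_product, product)
--
--     return max_product
-- ===== SOURCE B (Python) =====
-- def solve_naive(grid, length=4):
--     if not grid or not grid[0]:
--         return 0
--     if length <= 0:
--         return 1  # empty-product windows: every start yields product 1
--     n = len(grid)
--     cols = len(grid[0])
--
--     def cell(r, c):
--         return grid[r][c]
--
--     seqs = []
--     # rows
--     for r in range(n):
--         seqs.append([cell(r, c) for c in range(cols)])
--     # columns
--     for c in range(cols):
--         seqs.append([cell(r, c) for r in range(n)])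
--     # down-right diagonals starting on the left edge, then on the top edge
--     for r in range(n):
--         t = min(n - r, cols)
--         seqs.append([cell(r + k, k) for k in range(t)])
--     for c in range(1, cols):
--         t = min(n, cols - c)
--         seqs.append([cell(k, c + k) for k in range(t)])
--     # down-left anti-diagonals starting on the right edge, then on the top edge
--     for r in range(n):
--         t = min(n - r, cols)
--         seqs.append([cell(r + k, cols - 1 - k) for k in range(t)])
--     for c in range(cols - 1):
--         t = min(n, c + 1)
--         seqs.append([cell(k, c - k) for k in range(t)])
--
--     best = 0
--     for seq in seqs:
--         for i in range(len(seq) - length + 1):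
--             p = 1
--             for x in seq[i : i + length]:
--                 p *= x
--             best = max(best, p)
--     return best
-- ===== Notes on version B (the rewrite author's own statement) =====
-- stated objective: alternative
-- what changed: B extracts the grid once into 1-D sequences (rows, columns, down-right diagonals, down-left anti-diagonals) and slides a product window of size length over each, instead of A's probing of every (cell, direction) pair with a per-step bounds check and off-grid zero results.
import Mathlib
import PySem

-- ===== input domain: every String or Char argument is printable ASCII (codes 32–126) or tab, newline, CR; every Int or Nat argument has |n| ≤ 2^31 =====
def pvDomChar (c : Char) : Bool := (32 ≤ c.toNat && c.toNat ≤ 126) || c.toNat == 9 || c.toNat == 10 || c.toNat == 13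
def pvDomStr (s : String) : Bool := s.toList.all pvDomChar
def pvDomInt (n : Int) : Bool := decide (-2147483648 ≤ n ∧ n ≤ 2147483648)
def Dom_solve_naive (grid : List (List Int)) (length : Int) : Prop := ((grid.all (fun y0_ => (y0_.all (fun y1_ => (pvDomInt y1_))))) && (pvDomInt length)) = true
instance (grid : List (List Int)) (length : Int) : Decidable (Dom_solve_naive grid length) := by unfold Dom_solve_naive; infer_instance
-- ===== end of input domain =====

-- B replaces A's per-(cell,direction) probing (with per-step bounds checks) by extracting rows,
-- columns, diagonals and anti-diagonals as 1-D sequences and sliding a product window over each;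
-- an alternative decomposition of the same cost, proved to return the same maximum.


-- ===== PORT A =====
-- is_valid_position(row, col, grid)
def pvValid (grid : List (List Int)) (r c : Int) : Bool :=
  decide (0 ≤ r) && decide (r < (grid.length : Int)) &&
  decide (0 ≤ c) && decide (c < ((grid.headI).length : Int))

-- grid[row][col]; only reached after pvValid, so the .getD defaults are never taken on Pre_
def pvCell (grid : List (List Int)) (r c : Int) : Int :=
  (PySem.List.pyGet? ((PySem.List.pyGet? grid r).getD []) c).getD 0

-- the 'for i in range(length)' loop of get_product_in_direction; the position is advanced
-- incrementally ((row,col) = start + i·d), the fuel is the number of remaining iterations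
def pvGoA (grid : List (List Int)) (dr dc : Int) : Nat → Int → Int → Int → Int
  | 0, _, _, p => p
  | (L+1), r, c, p =>
      if pvValid grid r c then pvGoA grid dr dc L (r+dr) (c+dc) (p * pvCell grid r c) else 0

def get_product_in_direction (grid : List (List Int)) (sr sc : Int) (d : Int × Int)
    (length : Int) : Int :=
  match d with
  | (dr, dc) => pvGoA grid dr dc length.toNat sr sc 1

def pvDIRECTIONS : List (Int × Int) := [(0,1),(1,0),(1,1),(1,-1)]

def solve_naive (grid : List (List Int)) (length : Int) : Int :=
  if grid = [] ∨ grid.headI = [] then 0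
  else
    (PySem.List.pyRange 0 (grid.length : Int) 1).foldl
      (fun acc r =>
        (PySem.List.pyRange 0 ((grid.headI).length : Int) 1).foldl
          (fun acc c =>
            pvDIRECTIONS.foldl
              (fun acc d => max acc (get_product_in_direction grid r c d length)) acc)
          acc)
      0

-- ===== PORT B =====
-- cell(r, c) = grid[r][c] of Source B
def pvCellB (grid : List (List Int)) (r c : Int) : Int :=
  (PySem.List.pyGet? ((PySem.List.pyGet? grid r).getD []) c).getD 0

-- the six extend loops of Source B building seqs, in order
def pvSeqs (grid : List (List Int)) (n cols : Int) : List (List Int) :=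
  ((PySem.List.pyRange 0 n 1).map fun r =>
      (PySem.List.pyRange 0 cols 1).map fun c => pvCellB grid r c)
  ++ ((PySem.List.pyRange 0 cols 1).map fun c =>
      (PySem.List.pyRange 0 n 1).map fun r => pvCellB grid r c)
  ++ ((PySem.List.pyRange 0 n 1).map fun r =>
      (PySem.List.pyRange 0 (min (n - r) cols) 1).map fun k => pvCellB grid (r + k) k)
  ++ ((PySem.List.pyRange 1 cols 1).map fun c =>
      (PySem.List.pyRange 0 (min n (cols - c)) 1).map fun k => pvCellB grid k (c + k))
  ++ ((PySem.List.pyRange 0 n 1).map fun r =>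
      (PySem.List.pyRange 0 (min (n - r) cols) 1).map fun k => pvCellB grid (r + k) (cols - 1 - k))
  ++ ((PySem.List.pyRange 0 (cols - 1) 1).map fun c =>
      (PySem.List.pyRange 0 (min n (c + 1)) 1).map fun k => pvCellB grid k (c - k))

-- p = 1; for x in seq[i : i + length]: p *= x
def pvWinProd (seq : List Int) (i length : Int) : Int :=
  (PySem.List.slice seq (some i) (some (i + length))).foldl (fun p x => p * x) 1

def solve_naive_alt (grid : List (List Int)) (length : Int) : Int :=
  if grid = [] ∨ grid.headI = [] then 0
  else if length ≤ 0 then 1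
  else
    (pvSeqs grid (grid.length : Int) ((grid.headI).length : Int)).foldl
      (fun best seq =>
        (PySem.List.pyRange 0 ((seq.length : Int) - length + 1) 1).foldl
          (fun best i => max best (pvWinProd seq i length)) best)
      0

-- ===== PRECONDITION & SPEC =====
-- Pre_ excludes exactly the ragged grids (some row shorter than the first row) probed with
-- length ≥ 1, on which Python A raises IndexError.
def Pre_solve_naive (grid : List (List Int)) (length : Int) : Prop :=
  1 ≤ length → ∀ row ∈ grid, (grid.headI).length ≤ row.length
instance (grid : List (List Int)) (length : Int) : Decidable (Pre_solve_naive grid length) := by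
  unfold Pre_solve_naive; infer_instance
def pvWitness_solve_naive : List (List Int) × Int := ([[1, 2], [3, 4]], 2)

def Spec_solve_naive (grid : List (List Int)) (length : Int) (out : Int) : Prop :=
  out = solve_naive_alt grid length
instance (grid : List (List Int)) (length : Int) (out : Int) :
    Decidable (Spec_solve_naive grid length out) := by unfold Spec_solve_naive; infer_instance

-- ===== CLAIM (what is proved, stated in full; the proofs are below) =====
def Claim_equal_solve_naive : Prop := ∀ (grid : List (List Int)) (length : Int), Dom_solve_naive grid length → Pre_solve_naive grid length → Spec_solve_naive grid length (solve_naive grid length)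

-- ===== LEMMAS AND PROOFS =====

-- generic foldl toolkit (folds whose step can only grow the accumulator)
theorem pv_foldl_le {α : Type} (step : Int → α → Int) (l : List α) (a b : Int)
    (h : ∀ x ∈ l, ∀ y, y ≤ b → step y x ≤ b) (ha : a ≤ b) : l.foldl step a ≤ b := by
  induction l generalizing a with
  | nil => simpa using ha
  | cons x t ih =>
      exact ih (step a x) (fun z hz y hy => h z (List.mem_cons_of_mem _ hz) y hy)
        (h x List.mem_cons_self a ha)

theorem pv_le_foldl {α : Type} (step : Int → α → Int) (l : List α) (a : Int)
    (h : ∀ x ∈ l, ∀ y, y ≤ step y x) : a ≤ l.foldl step a := by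
  induction l generalizing a with
  | nil => simp
  | cons x t ih =>
      exact le_trans (h x List.mem_cons_self a)
        (ih (step a x) (fun z hz y => h z (List.mem_cons_of_mem _ hz) y))

theorem pv_reach {α : Type} (step : Int → α → Int) (l : List α) (a v : Int) (x : α)
    (hx : x ∈ l) (hexp : ∀ z ∈ l, ∀ y, y ≤ step y z) (hv : ∀ y, v ≤ step y x) :
    v ≤ l.foldl step a := by
  induction l generalizing a with
  | nil => cases hx
  | cons z t ih =>
      rcases List.mem_cons.mp hx with h | h
      · subst h
        exact le_trans (hv a)
          (pv_le_foldl step t (step a x) (fun w hw y => hexp w (List.mem_cons_of_mem _ hw) y))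
      · exact ih (step a z) h (fun w hw y => hexp w (List.mem_cons_of_mem _ hw) y)

-- straight product g i * g (i+1) * … * g (i+L-1)
def pvRunP (g : Int → Int) : Nat → Int → Int
  | 0, _ => 1
  | (L+1), j => g j * pvRunP g L (j+1)

theorem pvRunP_congr (g h : Int → Int) : ∀ (L : Nat) (i : Int),
    (∀ j : Int, i ≤ j → j < i + L → g j = h j) → pvRunP g L i = pvRunP h L i := by
  intro L
  induction L with
  | zero => intro i _; rfl
  | succ L ih =>
      intro i hgh
      simp only [pvRunP]
      rw [hgh i le_rfl (by push_cast; omega),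
        ih (i+1) (fun j h1 h2 => hgh j (by omega) (by push_cast at h2 ⊢; omega))]

theorem pvRunP_shift (g : Int → Int) (a : Int) : ∀ (L : Nat) (i : Int),
    pvRunP (fun k => g (k + a)) L i = pvRunP g L (i + a) := by
  intro L
  induction L with
  | zero => intro i; rfl
  | succ L ih =>
      intro i
      simp only [pvRunP]
      rw [ih (i+1)]
      have h : i + 1 + a = i + a + 1 := by ring
      rw [h]

theorem pvRunP_eq_of_offset (g F : Int → Int) (i : Int) (L : Nat)
    (hg : ∀ k : Int, 0 ≤ k → k < (L : Int) → g (i + k) = F k) :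
    pvRunP g L i = pvRunP F L 0 := by
  have h1 : pvRunP (fun k => g (k + i)) L 0 = pvRunP g L (0 + i) := pvRunP_shift g i L 0
  rw [zero_add] at h1
  rw [← h1]
  refine pvRunP_congr _ F L 0 ?_
  intro j hj1 hj2
  show g (j + i) = F j
  rw [show j + i = i + j from by ring]
  exact hg j hj1 (by omega)

theorem pvValid_iff (grid : List (List Int)) (r c : Int) :
    pvValid grid r c = true ↔
      0 ≤ r ∧ r < (grid.length : Int) ∧ 0 ≤ c ∧ c < ((grid.headI).length : Int) := by
  simp [pvValid, and_assoc]

theorem pvCell_congr (grid : List (List Int)) {a a' b b' : Int} (h1 : a = a') (h2 : b = b') :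
    pvCell grid a b = pvCell grid a' b' := by rw [h1, h2]

theorem pvGoA_eq_zero (grid : List (List Int)) (dr dc : Int) : ∀ (L : Nat) (r c p : Int),
    (∃ k : Nat, k < L ∧ pvValid grid (r + (k : Int) * dr) (c + (k : Int) * dc) = false) →
    pvGoA grid dr dc L r c p = 0 := by
  intro L
  induction L with
  | zero =>
      rintro r c p ⟨k, hk, _⟩
      omega
  | succ L ih =>
      rintro r c p ⟨k, hk, hkv⟩
      by_cases hv : pvValid grid r c = true
      · simp only [pvGoA, hv, if_true]
        apply ih
        have hk0 : k ≠ 0 := by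
          intro h; subst h
          simp only [Nat.cast_zero, zero_mul, add_zero] at hkv
          rw [hv] at hkv; cases hkv
        obtain ⟨k', rfl⟩ : ∃ k', k = k' + 1 := ⟨k - 1, by omega⟩
        refine ⟨k', by omega, ?_⟩
        have e1 : r + dr + (k' : Int) * dr = r + ((k' + 1 : Nat) : Int) * dr := by push_cast; ring
        have e2 : c + dc + (k' : Int) * dc = c + ((k' + 1 : Nat) : Int) * dc := by push_cast; ring
        rw [e1, e2]
        exact hkv
      · simp [pvGoA, hv]

theorem pvGoA_eq_run (grid : List (List Int)) (dr dc : Int) : ∀ (L : Nat) (r c p : Int),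
    (∀ k : Nat, k < L → pvValid grid (r + (k : Int) * dr) (c + (k : Int) * dc) = true) →
    pvGoA grid dr dc L r c p =
      p * pvRunP (fun k => pvCell grid (r + k * dr) (c + k * dc)) L 0 := by
  intro L
  induction L with
  | zero => intro r c p _; simp [pvGoA, pvRunP]
  | succ L ih =>
      intro r c p hall
      have hv : pvValid grid r c = true := by
        have h := hall 0 (by omega)
        simpa using h
      have hall' : ∀ k : Nat, k < L →
          pvValid grid (r + dr + (k : Int) * dr) (c + dc + (k : Int) * dc) = true := by
        intro k hk
        have h := hall (k+1) (by omega)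
        have e1 : r + ((k + 1 : Nat) : Int) * dr = r + dr + (k : Int) * dr := by push_cast; ring
        have e2 : c + ((k + 1 : Nat) : Int) * dc = c + dc + (k : Int) * dc := by push_cast; ring
        rw [e1, e2] at h
        exact h
      simp only [pvGoA, hv, if_true]
      rw [ih (r+dr) (c+dc) (p * pvCell grid r c) hall']
      simp only [pvRunP, zero_add]
      rw [show r + 0 * dr = r from by ring, show c + 0 * dc = c from by ring]
      rw [show pvRunP (fun k => pvCell grid (r + k * dr) (c + k * dc)) L 1 =
            pvRunP (fun k => pvCell grid (r + dr + k * dr) (c + dc + k * dc)) L 0 from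
        pvRunP_eq_of_offset _ _ 1 L
          (fun k _ _ => pvCell_congr grid (by ring) (by ring))]
      ring

theorem pv_foldl_mul (l : List Int) (a : Int) :
    l.foldl (fun p x => p * x) a = a * l.foldl (fun p x => p * x) 1 := by
  induction l generalizing a with
  | nil => simp
  | cons x t ih =>
      simp only [List.foldl_cons]
      rw [ih (a * x), ih (1 * x)]
      ring

theorem pv_win_of_range (g : Int → Int) : ∀ (L : Nat) (i t : Int), 0 ≤ i → i + L ≤ t →
    (((PySem.List.pyRange i t 1).map g).take L).foldl (fun p x => p * x) 1 = pvRunP g L i := by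
  intro L
  induction L with
  | zero => intro i t _ _; simp [pvRunP]
  | succ L ih =>
      intro i t h1 h2
      have hit : i < t := by push_cast at h2; omega
      rw [PySem.List.pyRange_one_cons hit]
      simp only [List.map_cons, List.take_succ_cons, List.foldl_cons]
      rw [pv_foldl_mul, ih (i+1) t (by omega) (by push_cast at h2 ⊢; omega)]
      simp [pvRunP]

theorem pv_len_map_range {β : Type} (f : Int → β) (t : Int) (ht : 0 ≤ t) :
    (((PySem.List.pyRange 0 t 1).map f).length : Int) = t := by
  rw [List.length_map, PySem.List.length_pyRange_one]
  omega

theorem pvWinProd_map_pyRange (g : Int → Int) (t i : Int) (L : Nat)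
    (hi : 0 ≤ i) (hiL : i + L ≤ t) :
    pvWinProd ((PySem.List.pyRange 0 t 1).map g) i (L : Int) = pvRunP g L i := by
  unfold pvWinProd
  rw [PySem.List.slice_toNat _ hi (by omega)]
  rw [show (i + (L : Int)).toNat - i.toNat = L from by omega]
  have hsplit : PySem.List.pyRange 0 t 1 = PySem.List.pyRange 0 i 1 ++ PySem.List.pyRange i t 1 :=
    PySem.List.pyRange_one_append 0 i t hi (by omega)
  rw [hsplit, List.map_append,
    List.drop_left' (by rw [List.length_map, PySem.List.length_pyRange_one]; omega)]
  exact pv_win_of_range g L i t hi hiL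

theorem pv_B_nonneg (grid : List (List Int)) (length : Int) :
    0 ≤ solve_naive_alt grid length := by
  unfold solve_naive_alt
  split_ifs
  · norm_num
  · norm_num
  · exact pv_le_foldl _ _ 0 (fun seq _ y => pv_le_foldl _ _ y (fun i _ z => le_max_left _ _))

theorem pv_A_nonneg (grid : List (List Int)) (length : Int) :
    0 ≤ solve_naive grid length := by
  unfold solve_naive
  split_ifs
  · norm_num
  · exact pv_le_foldl _ _ 0 (fun r _ y => pv_le_foldl _ _ y
      (fun c _ w => pv_le_foldl _ _ w (fun d _ u => le_max_left _ _)))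

theorem pv_run_le_A (grid : List (List Int)) (length r c : Int) (d : Int × Int)
    (hguard : ¬(grid = [] ∨ grid.headI = []))
    (hr : 0 ≤ r ∧ r < (grid.length : Int)) (hc : 0 ≤ c ∧ c < ((grid.headI).length : Int))
    (hd : d ∈ pvDIRECTIONS) :
    get_product_in_direction grid r c d length ≤ solve_naive grid length := by
  unfold solve_naive
  rw [if_neg hguard]
  refine pv_reach _ _ 0 _ r (PySem.List.mem_pyRange_one.mpr ⟨hr.1, hr.2⟩)
    (fun z _ y => pv_le_foldl _ _ y (fun c' _ w => pv_le_foldl _ _ w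
      (fun d' _ u => le_max_left _ _))) ?_
  intro y
  refine pv_reach _ _ y _ c (PySem.List.mem_pyRange_one.mpr ⟨hc.1, hc.2⟩)
    (fun z _ w => pv_le_foldl _ _ w (fun d' _ u => le_max_left _ _)) ?_
  intro w
  exact pv_reach _ _ w _ d hd (fun z _ u => le_max_left _ _) (fun u => le_max_right _ _)

theorem pv_win_le_B (grid : List (List Int)) (length : Int) (seq : List Int) (i : Int)
    (hguard : ¬(grid = [] ∨ grid.headI = [])) (hlen : ¬ length ≤ 0)
    (hseq : seq ∈ pvSeqs grid (grid.length : Int) ((grid.headI).length : Int))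
    (hi : 0 ≤ i) (hiL : i < (seq.length : Int) - length + 1) :
    pvWinProd seq i length ≤ solve_naive_alt grid length := by
  unfold solve_naive_alt
  rw [if_neg hguard, if_neg hlen]
  refine pv_reach _ _ 0 _ seq hseq
    (fun z _ y => pv_le_foldl _ _ y (fun i' _ w => le_max_left _ _)) ?_
  intro y
  exact pv_reach _ _ y _ i (PySem.List.mem_pyRange_one.mpr ⟨hi, hiL⟩)
    (fun z _ w => le_max_left _ _) (fun w => le_max_right _ _)

-- membership of each of the six sequence families in pvSeqs
theorem pv_mem_seqs₁ (grid : List (List Int)) (n cols r : Int) (h1 : 0 ≤ r) (h2 : r < n) :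
    ((PySem.List.pyRange 0 cols 1).map fun c => pvCellB grid r c) ∈ pvSeqs grid n cols := by
  exact List.mem_append_left _ (List.mem_append_left _ (List.mem_append_left _
    (List.mem_append_left _ (List.mem_append_left _
      (List.mem_map.mpr ⟨r, PySem.List.mem_pyRange_one.mpr ⟨h1, h2⟩, rfl⟩)))))

theorem pv_mem_seqs₂ (grid : List (List Int)) (n cols c : Int) (h1 : 0 ≤ c) (h2 : c < cols) :
    ((PySem.List.pyRange 0 n 1).map fun r => pvCellB grid r c) ∈ pvSeqs grid n cols := by
  exact List.mem_append_left _ (List.mem_append_left _ (List.mem_append_left _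
    (List.mem_append_left _ (List.mem_append_right _
      (List.mem_map.mpr ⟨c, PySem.List.mem_pyRange_one.mpr ⟨h1, h2⟩, rfl⟩)))))

theorem pv_mem_seqs₃ (grid : List (List Int)) (n cols r : Int) (h1 : 0 ≤ r) (h2 : r < n) :
    ((PySem.List.pyRange 0 (min (n - r) cols) 1).map fun k => pvCellB grid (r + k) k)
      ∈ pvSeqs grid n cols := by
  exact List.mem_append_left _ (List.mem_append_left _ (List.mem_append_left _
    (List.mem_append_right _
      (List.mem_map.mpr ⟨r, PySem.List.mem_pyRange_one.mpr ⟨h1, h2⟩, rfl⟩))))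

theorem pv_mem_seqs₄ (grid : List (List Int)) (n cols c : Int) (h1 : 1 ≤ c) (h2 : c < cols) :
    ((PySem.List.pyRange 0 (min n (cols - c)) 1).map fun k => pvCellB grid k (c + k))
      ∈ pvSeqs grid n cols := by
  exact List.mem_append_left _ (List.mem_append_left _ (List.mem_append_right _
    (List.mem_map.mpr ⟨c, PySem.List.mem_pyRange_one.mpr ⟨h1, h2⟩, rfl⟩)))

theorem pv_mem_seqs₅ (grid : List (List Int)) (n cols r : Int) (h1 : 0 ≤ r) (h2 : r < n) :
    ((PySem.List.pyRange 0 (min (n - r) cols) 1).map fun k => pvCellB grid (r + k) (cols - 1 - k))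
      ∈ pvSeqs grid n cols := by
  exact List.mem_append_left _ (List.mem_append_right _
    (List.mem_map.mpr ⟨r, PySem.List.mem_pyRange_one.mpr ⟨h1, h2⟩, rfl⟩))

theorem pv_mem_seqs₆ (grid : List (List Int)) (n cols c : Int) (h1 : 0 ≤ c) (h2 : c < cols - 1) :
    ((PySem.List.pyRange 0 (min n (c + 1)) 1).map fun k => pvCellB grid k (c - k))
      ∈ pvSeqs grid n cols := by
  exact List.mem_append_right _
    (List.mem_map.mpr ⟨c, PySem.List.mem_pyRange_one.mpr ⟨h1, h2⟩, rfl⟩)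

-- a full window of a sequence of B is bounded by B's result
theorem pv_case_tail (grid : List (List Int)) (length : Int)
    (hguard : ¬(grid = [] ∨ grid.headI = [])) (hlen : ¬ length ≤ 0)
    (L : Nat) (hLI : (L : Int) = length) (g : Int → Int) (t i : Int) (F : Int → Int)
    (hseq : ((PySem.List.pyRange 0 t 1).map g)
        ∈ pvSeqs grid (grid.length : Int) ((grid.headI).length : Int))
    (hi : 0 ≤ i) (hiL : i + (L : Int) ≤ t)
    (hoff : ∀ k : Int, 0 ≤ k → k < (L : Int) → g (i + k) = F k) :
    pvRunP F L 0 ≤ solve_naive_alt grid length := by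
  have hlen0 : (((PySem.List.pyRange 0 t 1).map g).length : Int) = t :=
    pv_len_map_range g t (by omega)
  have hwin := pv_win_le_B grid length _ i hguard hlen hseq hi (by rw [hlen0]; omega)
  calc pvRunP F L 0 = pvRunP g L i := (pvRunP_eq_of_offset g F i L hoff).symm
    _ = pvWinProd ((PySem.List.pyRange 0 t 1).map g) i (L : Int) :=
        (pvWinProd_map_pyRange g t i L hi hiL).symm
    _ = pvWinProd ((PySem.List.pyRange 0 t 1).map g) i length := by rw [hLI]
    _ ≤ _ := hwin

-- an in-grid directional run is bounded by A's result
theorem pv_tail_A (grid : List (List Int)) (length : Int)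
    (hguard : ¬(grid = [] ∨ grid.headI = []))
    (L : Nat) (hLI : (L : Int) = length) (r c dr dc : Int)
    (hd : (dr, dc) ∈ pvDIRECTIONS)
    (hr : 0 ≤ r ∧ r < (grid.length : Int)) (hc : 0 ≤ c ∧ c < ((grid.headI).length : Int))
    (hall : ∀ k : Nat, k < L → pvValid grid (r + (k : Int) * dr) (c + (k : Int) * dc) = true) :
    pvRunP (fun k => pvCell grid (r + k * dr) (c + k * dc)) L 0 ≤ solve_naive grid length := by
  have h := pv_run_le_A grid length r c (dr, dc) hguard hr hc hd
  have h2 : get_product_in_direction grid r c (dr, dc) length = pvGoA grid dr dc length.toNat r c 1 := rfl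
  rw [h2, show length.toNat = L from by omega, pvGoA_eq_run grid dr dc L r c 1 hall, one_mul] at h
  exact h

theorem pv_A_le_B (grid : List (List Int)) (length : Int) :
    solve_naive grid length ≤ solve_naive_alt grid length := by
  by_cases hguard : grid = [] ∨ grid.headI = []
  · unfold solve_naive; rw [if_pos hguard]; exact pv_B_nonneg grid length
  by_cases hlen : length ≤ 0
  · have hB : solve_naive_alt grid length = 1 := by
      unfold solve_naive_alt; rw [if_neg hguard, if_pos hlen]
    unfold solve_naive
    rw [if_neg hguard, hB]
    refine pv_foldl_le _ _ 0 1 ?_ (by norm_num)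
    intro r _ y hy
    refine pv_foldl_le _ _ y 1 ?_ hy
    intro c _ w hw
    refine pv_foldl_le _ _ w 1 ?_ hw
    intro d _ u hu
    obtain ⟨dr, dc⟩ := d
    have h1 : get_product_in_direction grid r c (dr, dc) length = 1 := by
      show pvGoA grid dr dc length.toNat r c 1 = 1
      rw [show length.toNat = 0 from by omega]
      rfl
    rw [h1]
    exact max_le hu le_rfl
  · unfold solve_naive
    rw [if_neg hguard]
    refine pv_foldl_le _ _ 0 _ ?_ (pv_B_nonneg grid length)
    intro r hrmem y hy
    refine pv_foldl_le _ _ y _ ?_ hy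
    intro c hcmem w hw
    refine pv_foldl_le _ _ w _ ?_ hw
    intro d hdmem u hu
    obtain ⟨dr, dc⟩ := d
    refine max_le hu ?_
    have hr := PySem.List.mem_pyRange_one.mp hrmem
    have hc := PySem.List.mem_pyRange_one.mp hcmem
    set L := length.toNat with hLdef
    have hLI : (L : Int) = length := by omega
    show pvGoA grid dr dc L r c 1 ≤ solve_naive_alt grid length
    by_cases hall : ∀ k : Nat, k < L → pvValid grid (r + (k : Int) * dr) (c + (k : Int) * dc) = true
    · rw [pvGoA_eq_run grid dr dc L r c 1 hall, one_mul]
      have hL1 : 1 ≤ L := by omega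
      have h0 := (pvValid_iff grid _ _).mp (hall 0 (by omega))
      have hE := (pvValid_iff grid _ _).mp (hall (L-1) (by omega))
      simp only [Nat.cast_zero, zero_mul, add_zero] at h0
      simp only [pvDIRECTIONS, List.mem_cons, Prod.mk.injEq, List.not_mem_nil, or_false] at hdmem
      rcases hdmem with ⟨rfl, rfl⟩ | ⟨rfl, rfl⟩ | ⟨rfl, rfl⟩ | ⟨rfl, rfl⟩
      · -- direction (0,1): row r of seqs, window at i = c
        refine pv_case_tail grid length hguard hlen L hLI
          (fun c' => pvCellB grid r c') ((grid.headI).length : Int) c _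
          (pv_mem_seqs₁ grid _ _ r h0.1 h0.2.1) h0.2.2.1 (by omega) ?_
        intro k h1 h2
        exact pvCell_congr grid (by ring) (by ring)
      · -- direction (1,0): column c of seqs, window at i = r
        refine pv_case_tail grid length hguard hlen L hLI
          (fun r' => pvCellB grid r' c) ((grid.length : Int)) r _
          (pv_mem_seqs₂ grid _ _ c h0.2.2.1 h0.2.2.2) h0.1 (by omega) ?_
        intro k h1 h2
        exact pvCell_congr grid (by ring) (by ring)
      · -- direction (1,1): diagonal
        by_cases hrc : c ≤ r
        · refine pv_case_tail grid length hguard hlen L hLI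
            (fun k => pvCellB grid (r - c + k) k) (min ((grid.length : Int) - (r - c)) ((grid.headI).length : Int)) c _
            (pv_mem_seqs₃ grid _ _ (r - c) (by omega) (by omega)) h0.2.2.1 (by omega) ?_
          intro k h1 h2
          exact pvCell_congr grid (by ring) (by ring)
        · refine pv_case_tail grid length hguard hlen L hLI
            (fun k => pvCellB grid k (c - r + k)) (min (grid.length : Int) (((grid.headI).length : Int) - (c - r))) r _
            (pv_mem_seqs₄ grid _ _ (c - r) (by omega) (by omega)) h0.1 (by omega) ?_
          intro k h1 h2
          exact pvCell_congr grid (by ring) (by ring)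
      · -- direction (1,-1): anti-diagonal
        by_cases hrc : ((grid.headI).length : Int) - 1 - c ≤ r
        · refine pv_case_tail grid length hguard hlen L hLI
            (fun k => pvCellB grid (r - (((grid.headI).length : Int) - 1 - c) + k) (((grid.headI).length : Int) - 1 - k))
            (min ((grid.length : Int) - (r - (((grid.headI).length : Int) - 1 - c))) ((grid.headI).length : Int))
            (((grid.headI).length : Int) - 1 - c) _
            (pv_mem_seqs₅ grid _ _ (r - (((grid.headI).length : Int) - 1 - c)) (by omega) (by omega))
            (by omega) (by omega) ?_
          intro k h1 h2
          exact pvCell_congr grid (by ring) (by ring)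
        · refine pv_case_tail grid length hguard hlen L hLI
            (fun k => pvCellB grid k (c + r - k)) (min (grid.length : Int) (c + r + 1)) r _
            (pv_mem_seqs₆ grid _ _ (c + r) (by omega) (by omega)) h0.1 (by omega) ?_
          intro k h1 h2
          exact pvCell_congr grid (by ring) (by ring)
    · push Not at hall
      obtain ⟨k, hk, hkv⟩ := hall
      rw [pvGoA_eq_zero grid dr dc L r c 1 ⟨k, hk, by simpa using hkv⟩]
      exact pv_B_nonneg grid length

theorem pv_B_le_A (grid : List (List Int)) (length : Int) :
    solve_naive_alt grid length ≤ solve_naive grid length := by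
  by_cases hguard : grid = [] ∨ grid.headI = []
  · unfold solve_naive_alt; rw [if_pos hguard]; exact pv_A_nonneg grid length
  have hgrid : grid ≠ [] ∧ grid.headI ≠ [] := by tauto
  have hn : 0 < (grid.length : Int) := by
    have := List.length_pos_of_ne_nil hgrid.1; omega
  have hcols : 0 < ((grid.headI).length : Int) := by
    have := List.length_pos_of_ne_nil hgrid.2; omega
  by_cases hlen : length ≤ 0
  · have hB : solve_naive_alt grid length = 1 := by
      unfold solve_naive_alt; rw [if_neg hguard, if_pos hlen]
    rw [hB]
    unfold solve_naive
    rw [if_neg hguard]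
    refine pv_reach _ _ 0 1 0 (PySem.List.mem_pyRange_one.mpr ⟨le_rfl, hn⟩)
      (fun z _ y => pv_le_foldl _ _ y (fun c' _ w => pv_le_foldl _ _ w
        (fun d' _ u => le_max_left _ _))) ?_
    intro y
    refine pv_reach _ _ y 1 0 (PySem.List.mem_pyRange_one.mpr ⟨le_rfl, hcols⟩)
      (fun z _ w => pv_le_foldl _ _ w (fun d' _ u => le_max_left _ _)) ?_
    intro w
    refine pv_reach _ _ w 1 ((0 : Int), (1 : Int)) (by simp [pvDIRECTIONS])
      (fun z _ u => le_max_left _ _) ?_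
    intro u
    have h1 : get_product_in_direction grid 0 0 ((0 : Int), (1 : Int)) length = 1 := by
      show pvGoA grid 0 1 length.toNat 0 0 1 = 1
      rw [show length.toNat = 0 from by omega]
      rfl
    rw [h1]
    exact le_max_right _ _
  · unfold solve_naive_alt
    rw [if_neg hguard, if_neg hlen]
    refine pv_foldl_le _ _ 0 _ ?_ (pv_A_nonneg grid length)
    intro seq hseq y hy
    refine pv_foldl_le _ _ y _ ?_ hy
    intro i him u hu
    refine max_le hu ?_
    have him' := PySem.List.mem_pyRange_one.mp him
    set L := length.toNat with hLdef
    have hLI : (L : Int) = length := by omega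
    have hL1 : 1 ≤ L := by omega
    simp only [pvSeqs, List.mem_append, List.mem_map] at hseq
    rcases hseq with ((((hx | hx) | hx) | hx) | hx) | hx
    · -- row r: start (r, i), direction (0,1)
      obtain ⟨r, hrm, rfl⟩ := hx
      rw [PySem.List.mem_pyRange_one] at hrm
      rw [pv_len_map_range _ _ (by omega)] at him'
      have hiL : i + (L : Int) ≤ ((grid.headI).length : Int) := by omega
      calc pvWinProd _ i length = pvWinProd _ i (L : Int) := by rw [hLI]
        _ = pvRunP (fun c' => pvCellB grid r c') L i := pvWinProd_map_pyRange _ _ i L him'.1 hiL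
        _ = pvRunP (fun k => pvCell grid (r + k * 0) (i + k * 1)) L 0 :=
            pvRunP_eq_of_offset _ _ i L (fun k h1 h2 => pvCell_congr grid (by ring) (by ring))
        _ ≤ _ := pv_tail_A grid length hguard L hLI r i 0 1 (by simp [pvDIRECTIONS])
            ⟨hrm.1, hrm.2⟩ ⟨him'.1, by omega⟩
            (fun k hk => by rw [pvValid_iff]; omega)
    · -- column c: start (i, c), direction (1,0)
      obtain ⟨c, hcm, rfl⟩ := hx
      rw [PySem.List.mem_pyRange_one] at hcm
      rw [pv_len_map_range _ _ (by omega)] at him'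
      have hiL : i + (L : Int) ≤ (grid.length : Int) := by omega
      calc pvWinProd _ i length = pvWinProd _ i (L : Int) := by rw [hLI]
        _ = pvRunP (fun r' => pvCellB grid r' c) L i := pvWinProd_map_pyRange _ _ i L him'.1 hiL
        _ = pvRunP (fun k => pvCell grid (i + k * 1) (c + k * 0)) L 0 :=
            pvRunP_eq_of_offset _ _ i L (fun k h1 h2 => pvCell_congr grid (by ring) (by ring))
        _ ≤ _ := pv_tail_A grid length hguard L hLI i c 1 0 (by simp [pvDIRECTIONS])
            ⟨him'.1, by omega⟩ ⟨hcm.1, hcm.2⟩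
            (fun k hk => by rw [pvValid_iff]; omega)
    · -- diagonal from (r, 0): start (r + i, i), direction (1,1)
      obtain ⟨r, hrm, rfl⟩ := hx
      rw [PySem.List.mem_pyRange_one] at hrm
      rw [pv_len_map_range _ _ (by omega)] at him'
      have hiL : i + (L : Int) ≤ min ((grid.length : Int) - r) ((grid.headI).length : Int) := by omega
      calc pvWinProd _ i length = pvWinProd _ i (L : Int) := by rw [hLI]
        _ = pvRunP (fun k => pvCellB grid (r + k) k) L i := pvWinProd_map_pyRange _ _ i L him'.1 hiL
        _ = pvRunP (fun k => pvCell grid ((r + i) + k * 1) (i + k * 1)) L 0 :=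
            pvRunP_eq_of_offset _ _ i L (fun k h1 h2 => pvCell_congr grid (by ring) (by ring))
        _ ≤ _ := pv_tail_A grid length hguard L hLI (r + i) i 1 1 (by simp [pvDIRECTIONS])
            ⟨by omega, by omega⟩ ⟨him'.1, by omega⟩
            (fun k hk => by rw [pvValid_iff]; omega)
    · -- diagonal from (0, c): start (i, c + i), direction (1,1)
      obtain ⟨c, hcm, rfl⟩ := hx
      rw [PySem.List.mem_pyRange_one] at hcm
      rw [pv_len_map_range _ _ (by omega)] at him'
      have hiL : i + (L : Int) ≤ min (grid.length : Int) (((grid.headI).length : Int) - c) := by omega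
      calc pvWinProd _ i length = pvWinProd _ i (L : Int) := by rw [hLI]
        _ = pvRunP (fun k => pvCellB grid k (c + k)) L i := pvWinProd_map_pyRange _ _ i L him'.1 hiL
        _ = pvRunP (fun k => pvCell grid (i + k * 1) ((c + i) + k * 1)) L 0 :=
            pvRunP_eq_of_offset _ _ i L (fun k h1 h2 => pvCell_congr grid (by ring) (by ring))
        _ ≤ _ := pv_tail_A grid length hguard L hLI i (c + i) 1 1 (by simp [pvDIRECTIONS])
            ⟨him'.1, by omega⟩ ⟨by omega, by omega⟩
            (fun k hk => by rw [pvValid_iff]; omega)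
    · -- anti-diagonal from (r, cols-1): start (r + i, cols-1-i), direction (1,-1)
      obtain ⟨r, hrm, rfl⟩ := hx
      rw [PySem.List.mem_pyRange_one] at hrm
      rw [pv_len_map_range _ _ (by omega)] at him'
      have hiL : i + (L : Int) ≤ min ((grid.length : Int) - r) ((grid.headI).length : Int) := by omega
      calc pvWinProd _ i length = pvWinProd _ i (L : Int) := by rw [hLI]
        _ = pvRunP (fun k => pvCellB grid (r + k) (((grid.headI).length : Int) - 1 - k)) L i :=
            pvWinProd_map_pyRange _ _ i L him'.1 hiL
        _ = pvRunP (fun k => pvCell grid ((r + i) + k * 1)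
              ((((grid.headI).length : Int) - 1 - i) + k * (-1))) L 0 :=
            pvRunP_eq_of_offset _ _ i L (fun k h1 h2 => pvCell_congr grid (by ring) (by ring))
        _ ≤ _ := pv_tail_A grid length hguard L hLI (r + i) (((grid.headI).length : Int) - 1 - i)
            1 (-1) (by simp [pvDIRECTIONS])
            ⟨by omega, by omega⟩ ⟨by omega, by omega⟩
            (fun k hk => by rw [pvValid_iff]; omega)
    · -- anti-diagonal from (0, c): start (i, c - i), direction (1,-1)
      obtain ⟨c, hcm, rfl⟩ := hx
      rw [PySem.List.mem_pyRange_one] at hcm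
      rw [pv_len_map_range _ _ (by omega)] at him'
      have hiL : i + (L : Int) ≤ min (grid.length : Int) (c + 1) := by omega
      calc pvWinProd _ i length = pvWinProd _ i (L : Int) := by rw [hLI]
        _ = pvRunP (fun k => pvCellB grid k (c - k)) L i := pvWinProd_map_pyRange _ _ i L him'.1 hiL
        _ = pvRunP (fun k => pvCell grid (i + k * 1) ((c - i) + k * (-1))) L 0 :=
            pvRunP_eq_of_offset _ _ i L (fun k h1 h2 => pvCell_congr grid (by ring) (by ring))
        _ ≤ _ := pv_tail_A grid length hguard L hLI i (c - i) 1 (-1) (by simp [pvDIRECTIONS])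
            ⟨him'.1, by omega⟩ ⟨by omega, by omega⟩
            (fun k hk => by rw [pvValid_iff]; omega)

-- ===== VERDICT (by name: the statement is the Claim_ definition above) =====
theorem solve_naive_spec : Claim_equal_solve_naive := by
  intro grid length _ _
  unfold Spec_solve_naive
  exact le_antisymm (pv_A_le_B grid length) (pv_B_le_A grid length)
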